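-- pv_equiv track=rewrite | github.com/lautajam/pens_comp_cbc_fiuba | ejercicios_variados_parcial_2/prueba.py | unir
-- ===== SOURCE A (Python) =====
-- def unir(lista):
--     nombres, edad, oficio, nacionalidad, tipo_sangre, contador = [], [], [], [], [], 0
--     for dato in lista:
--         if contador == 0:
--             nombres.append(dato)
--         if contador == 1:
--             edad.append(dato)
--         if contador == 2:
--             oficio.append(dato)
--         if contador == 3:
--             nacionalidad.append(dato)
--         if contador == 4:
--             tipo_sangre.append(dato)
--             contador = 0
--             continue
--         contador += 1
--     return nombres, edad, oficio, nacionalidad, tipo_sangre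
-- ===== SOURCE B (Python) =====
-- def unir(lista):
--     nombres = list(lista[0::5])
--     edad = list(lista[1::5])
--     oficio = list(lista[2::5])
--     nacionalidad = list(lista[3::5])
--     tipo_sangre = list(lista[4::5])
--     return nombres, edad, oficio, nacionalidad, tipo_sangre
-- ===== Notes on version B (the rewrite author's own statement) =====
-- stated objective: idiomatic
-- what changed: Replaces the counter-driven one-pass distribution with five direct strided slices lista[k::5], eliminating the per-element branch ladder and the counter entirely.
import Mathlib
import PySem

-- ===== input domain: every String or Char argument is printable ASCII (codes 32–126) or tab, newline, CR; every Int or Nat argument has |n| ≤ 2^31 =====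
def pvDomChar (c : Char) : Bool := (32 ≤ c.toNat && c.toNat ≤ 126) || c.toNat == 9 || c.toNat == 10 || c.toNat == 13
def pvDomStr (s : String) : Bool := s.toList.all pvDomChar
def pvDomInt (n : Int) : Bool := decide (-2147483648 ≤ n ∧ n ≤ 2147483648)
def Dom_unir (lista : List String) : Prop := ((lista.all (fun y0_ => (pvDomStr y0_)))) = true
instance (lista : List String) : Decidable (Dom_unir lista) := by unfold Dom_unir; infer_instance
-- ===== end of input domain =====

-- B replaces A's counter-driven single pass by five strided slices lista[k::5] (idiomatic; return value only).

-- ===== PORT A =====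
-- A's loop: six pieces of state (five buckets and the counter), appends in branch order,
-- the contador == 4 branch resets the counter and `continue`s past the increment.
def unirLoop (nombres edad oficio nacionalidad tipo_sangre : List String) (contador : Int) :
    List String → List String × List String × List String × List String × List String
  | [] => (nombres, edad, oficio, nacionalidad, tipo_sangre)
  | dato :: rest =>
    let nombres := if contador = 0 then nombres ++ [dato] else nombres
    let edad := if contador = 1 then edad ++ [dato] else edad
    let oficio := if contador = 2 then oficio ++ [dato] else oficio
    let nacionalidad := if contador = 3 then nacionalidad ++ [dato] else nacionalidad
    if contador = 4 then
      unirLoop nombres edad oficio nacionalidad (tipo_sangre ++ [dato]) 0 rest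
    else
      unirLoop nombres edad oficio nacionalidad tipo_sangre (contador + 1) rest

def unir (lista : List String) : List String × List String × List String × List String × List String :=
  unirLoop [] [] [] [] [] 0 lista

-- ===== PORT B =====
-- lista[k::5]; the step literal 5 is nonzero, so slice? always returns some and getD [] never fires.
def unir_alt (lista : List String) : List String × List String × List String × List String × List String :=
  ((PySem.List.slice? lista (some 0) none 5).getD [],
   (PySem.List.slice? lista (some 1) none 5).getD [],
   (PySem.List.slice? lista (some 2) none 5).getD [],
   (PySem.List.slice? lista (some 3) none 5).getD [],
   (PySem.List.slice? lista (some 4) none 5).getD [])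

-- ===== PRECONDITION & SPEC =====
def Spec_unir (lista : List String) (out : List String × List String × List String × List String × List String) : Prop := out = unir_alt lista
instance (lista : List String) (out : List String × List String × List String × List String × List String) : Decidable (Spec_unir lista out) := by unfold Spec_unir; infer_instance

-- ===== CLAIM (what is proved, stated in full; the proofs are below) =====
def Claim_equal_unir : Prop := ∀ (lista : List String), Dom_unir lista → Spec_unir lista (unir lista)

-- ===== LEMMAS AND PROOFS =====

-- Elements of xs at indices ≡ k (mod 5), k < 5.
def pvStride : Nat → List String → List String
  | _, [] => []
  | 0, x :: xs => x :: pvStride 4 xs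
  | k + 1, _ :: xs => pvStride k xs

lemma pvStride_nil (k : Nat) : pvStride k [] = [] := by
  cases k <;> rfl

lemma pvStride_succ (k : Nat) (x : String) (xs : List String) :
    pvStride (k + 1) (x :: xs) = pvStride k xs := rfl

-- Nat-level closed form of the strided slice.
lemma stride_closed (xs : List String) : ∀ k : Nat, k < 5 →
    (if k < xs.length then
      (List.range ((xs.length - k + 4) / 5)).filterMap (fun j => xs[k + 5 * j]?)
    else []) = pvStride k xs := by
  induction xs with
  | nil => intro k _; simp [pvStride_nil]
  | cons x xs ih =>
    intro k hk
    match k with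
    | 0 =>
      rw [if_pos (by simp)]
      rw [show ((x :: xs).length - 0 + 4) / 5 = xs.length / 5 + 1 by simp; omega]
      rw [List.range_succ_eq_map, List.filterMap_cons]
      rw [show (x :: xs)[0 + 5 * 0]? = some x from rfl]
      rw [List.filterMap_map]
      have hidx : ∀ j : Nat, j ∈ List.range (xs.length / 5) →
          ((fun j => (x :: xs)[0 + 5 * j]?) ∘ Nat.succ) j = xs[4 + 5 * j]? := by
        intro j _
        show (x :: xs)[0 + 5 * (j + 1)]? = xs[4 + 5 * j]?
        rw [show 0 + 5 * (j + 1) = (4 + 5 * j) + 1 by omega, List.getElem?_cons_succ]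
      rw [List.filterMap_congr hidx]
      rw [show pvStride 0 (x :: xs) = x :: pvStride 4 xs from rfl]
      rw [← ih 4 (by omega)]
      by_cases h4 : 4 < xs.length
      · rw [if_pos h4, show (xs.length - 4 + 4) / 5 = xs.length / 5 by omega]
      · rw [if_neg h4, show xs.length / 5 = 0 by omega]
        simp
    | j + 1 =>
      rw [pvStride_succ, ← ih j (by omega)]
      by_cases h : j < xs.length
      · rw [if_pos (by simp only [List.length_cons]; omega), if_pos h]
        rw [show ((x :: xs).length - (j + 1) + 4) / 5 = (xs.length - j + 4) / 5 by
          simp only [List.length_cons]; omega]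
        apply List.filterMap_congr
        intro i _
        rw [show (j + 1) + 5 * i = (j + 5 * i) + 1 by omega, List.getElem?_cons_succ]
      · rw [if_neg (by simp only [List.length_cons]; omega), if_neg h]

-- slice? with a small nonnegative start and step 5 is pvStride.
lemma slice5 (xs : List String) (k : Nat) (hk : k < 5) :
    PySem.List.slice? xs (some (k : Int)) none 5 = some (pvStride k xs) := by
  rw [← stride_closed xs k hk]
  unfold PySem.List.slice? PySem.List.sliceIndices
  norm_num
  rw [if_neg (show ¬ ((k : Int) < 0) by omega)]
  by_cases hlt : k < xs.length
  · rw [show min (k : Int) (xs.length : Int) = (k : Int) by omega,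
        if_pos (show (k : Int) < (xs.length : Int) by omega), if_pos hlt]
    rw [show (((xs.length : Int) - (k : Int) + 5 - 1) / 5).toNat = (xs.length - k + 4) / 5 by
      omega]
    apply List.filterMap_congr
    intro j _
    rw [show ((k : Int) + 5 * (j : Int)).toNat = k + 5 * j by omega]
  · rw [show min (k : Int) (xs.length : Int) = (xs.length : Int) by omega,
        if_neg (show ¬ ((xs.length : Int) < (xs.length : Int)) by omega), if_neg hlt]
    simp

-- Loop invariant for A: with counter c (0 ≤ c < 5), bucket b receives the elements at
-- positions ≡ (b - c) (mod 5) of the remaining list, appended to its accumulator.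
lemma loop_eq : ∀ (xs : List String) (n e o na t : List String) (c : Nat), c < 5 →
    unirLoop n e o na t (c : Int) xs =
      (n ++ pvStride ((5 - c) % 5) xs, e ++ pvStride ((6 - c) % 5) xs,
       o ++ pvStride ((7 - c) % 5) xs, na ++ pvStride ((8 - c) % 5) xs,
       t ++ pvStride ((9 - c) % 5) xs) := by
  intro xs
  induction xs with
  | nil => intro n e o na t c _; simp [unirLoop, pvStride_nil]
  | cons x xs ih =>
    intro n e o na t c hc
    interval_cases c
    · have h := ih (n ++ [x]) e o na t 1 (by omega)
      norm_num at h ⊢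
      simp only [unirLoop]
      norm_num
      simpa [pvStride, pvStride_succ, List.append_assoc] using h
    · have h := ih n (e ++ [x]) o na t 2 (by omega)
      norm_num at h ⊢
      simp only [unirLoop]
      norm_num
      simpa [pvStride, pvStride_succ, List.append_assoc] using h
    · have h := ih n e (o ++ [x]) na t 3 (by omega)
      norm_num at h ⊢
      simp only [unirLoop]
      norm_num
      simpa [pvStride, pvStride_succ, List.append_assoc] using h
    · have h := ih n e o (na ++ [x]) t 4 (by omega)
      norm_num at h ⊢
      simp only [unirLoop]
      norm_num
      simpa [pvStride, pvStride_succ, List.append_assoc] using h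
    · have h := ih n e o na (t ++ [x]) 0 (by omega)
      norm_num at h ⊢
      simp only [unirLoop]
      norm_num
      simpa [pvStride, pvStride_succ, List.append_assoc] using h

-- ===== VERDICT (by name: the statement is the Claim_ definition above) =====
theorem unir_spec : Claim_equal_unir := by
  intro lista _
  unfold Spec_unir unir unir_alt
  have h0 := slice5 lista 0 (by omega)
  have h1 := slice5 lista 1 (by omega)
  have h2 := slice5 lista 2 (by omega)
  have h3 := slice5 lista 3 (by omega)
  have h4 := slice5 lista 4 (by omega)
  norm_num at h0 h1 h2 h3 h4
  rw [h0, h1, h2, h3, h4]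
  have h := loop_eq lista [] [] [] [] [] 0 (by omega)
  norm_num at h
  simpa using h
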